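-- pv_equiv track=rewrite | github.com/UIT-June-2025-Nhom-8/Project_Python_For_AI | demo/backend/app.py | generate_topic_name
-- ===== SOURCE A (Python) =====
-- def generate_topic_name(words):
--     """Generate a meaningful topic name based on the top words"""
--     # Define keyword patterns for different topic categories
--     topic_patterns = {
--         'Music & Audio': ['music', 'song', 'album', 'sound', 'audio', 'track', 'cd', 'listen'],
--         'Books & Reading': ['book', 'read', 'reading', 'story', 'character', 'author', 'novel', 'page'],
--         'Movies & Entertainment': ['movie', 'film', 'watch', 'funny', 'cinema', 'actor', 'director', 'scene'],
--         'Gaming': ['game', 'play', 'player', 'graphic', 'level', 'gaming', 'console', 'controller'],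
--         'Shopping Experience': ['amazon', 'product', 'received', 'ordered', 'delivery', 'purchase', 'buy', 'seller'],
--         'Media & Video': ['dvd', 'video', 'version', 'original', 'disc', 'format', 'quality', 'picture'],
--         'Religious & Spiritual': ['god', 'christian', 'john', 'hero', 'powerful', 'faith', 'church', 'bible'],
--         'Personal Stories': ['love', 'life', 'world', 'child', 'family', 'personal', 'experience', 'heart'],
--         'User Experience': ['great', 'very', 'work', 'use', 'bought', 'good', 'excellent', 'recommend'],
--         'General Reviews': ['not', 'but', 'rating', 'one', 'like', 'review', 'opinion', 'think']
--     }
--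
--     # Convert words to lowercase for matching
--     words_lower = [word.lower() for word in words]
--
--     # Score each topic category based on word matches
--     topic_scores = {}
--     for topic_name, keywords in topic_patterns.items():
--         score = sum(1 for word in words_lower if word in keywords)
--         if score > 0:
--             topic_scores[topic_name] = score
--
--     # Return the highest scoring topic, or generate from top words if no match
--     if topic_scores:
--         best_topic = max(topic_scores, key=topic_scores.get)
--         return best_topic
--     else:
--         # Fallback: create topic name from top 2-3 meaningful words
--         meaningful_words = [word for word in words if len(word) > 3][:3]
--         if meaningful_words:
--             return f"Topic: {', '.join(meaningful_words).title()}"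
--         else:
--             return f"Topic: {', '.join(words[:2]).title()}"
-- ===== SOURCE B (Python) =====
-- def generate_topic_name(words):
--     """Generate a meaningful topic name based on the top words"""
--     topics = ['Music & Audio', 'Books & Reading', 'Movies & Entertainment', 'Gaming',
--               'Shopping Experience', 'Media & Video', 'Religious & Spiritual',
--               'Personal Stories', 'User Experience', 'General Reviews']
--     # Flat inverted index: keyword -> index of its (unique) topic in `topics`.
--     keyword_index = {
--         'music': 0, 'song': 0, 'album': 0, 'sound': 0, 'audio': 0, 'track': 0, 'cd': 0, 'listen': 0,
--         'book': 1, 'read': 1, 'reading': 1, 'story': 1, 'character': 1, 'author': 1, 'novel': 1, 'page': 1,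
--         'movie': 2, 'film': 2, 'watch': 2, 'funny': 2, 'cinema': 2, 'actor': 2, 'director': 2, 'scene': 2,
--         'game': 3, 'play': 3, 'player': 3, 'graphic': 3, 'level': 3, 'gaming': 3, 'console': 3, 'controller': 3,
--         'amazon': 4, 'product': 4, 'received': 4, 'ordered': 4, 'delivery': 4, 'purchase': 4, 'buy': 4, 'seller': 4,
--         'dvd': 5, 'video': 5, 'version': 5, 'original': 5, 'disc': 5, 'format': 5, 'quality': 5, 'picture': 5,
--         'god': 6, 'christian': 6, 'john': 6, 'hero': 6, 'powerful': 6, 'faith': 6, 'church': 6, 'bible': 6,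
--         'love': 7, 'life': 7, 'world': 7, 'child': 7, 'family': 7, 'personal': 7, 'experience': 7, 'heart': 7,
--         'great': 8, 'very': 8, 'work': 8, 'use': 8, 'bought': 8, 'good': 8, 'excellent': 8, 'recommend': 8,
--         'not': 9, 'but': 9, 'rating': 9, 'one': 9, 'like': 9, 'review': 9, 'opinion': 9, 'think': 9,
--     }
--     # One pass over the words, counting hits per topic index.
--     counts = [0] * 10
--     for word in words:
--         i = keyword_index.get(word.lower())
--         if i is not None:
--             counts[i] += 1
--     if any(counts):
--         # First index with the maximal count = A's insertion-order max over positive scores.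
--         best = 0
--         for i in range(1, 10):
--             if counts[i] > counts[best]:
--                 best = i
--         return topics[best]
--     # Fallback: topic name from top 2-3 meaningful words.
--     meaningful = [word for word in words if len(word) > 3][:3]
--     chosen = meaningful or words[:2]
--     return "Topic: " + ", ".join(chosen).title()
-- ===== Notes on version B (the rewrite author's own statement) =====
-- stated objective: faster
-- what changed: B replaces A's ten passes over the word list (one per topic, each word tested by a linear scan of an 8-keyword list) by a flat keyword->topic-index dict and a single counting pass into a 10-slot counts list, then picks the first argmax index over the counts (equal to A's insertion-order max over positive scores); the fallback uses `or` on the meaningful-words list.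
import Mathlib
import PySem

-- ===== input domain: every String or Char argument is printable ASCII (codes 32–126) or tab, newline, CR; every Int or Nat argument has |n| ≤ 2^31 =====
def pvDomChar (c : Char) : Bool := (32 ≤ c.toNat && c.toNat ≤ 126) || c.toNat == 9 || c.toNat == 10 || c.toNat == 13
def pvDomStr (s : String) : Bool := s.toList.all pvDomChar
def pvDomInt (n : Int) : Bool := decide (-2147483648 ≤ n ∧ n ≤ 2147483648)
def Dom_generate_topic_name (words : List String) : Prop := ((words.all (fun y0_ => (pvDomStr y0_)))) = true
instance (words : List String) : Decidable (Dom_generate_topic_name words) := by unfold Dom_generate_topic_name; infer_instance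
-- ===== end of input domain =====

-- ===== PORT A =====
-- B replaces A's per-topic scans of the word list by a flat keyword -> topic-index dict, one
-- counting pass into a 10-slot counts list and a first-argmax scan (objective: faster; same
-- result incl. tie-breaking and fallback).

-- The topic_patterns literal of A.
def pvPattern : List (String × List String) := [
  ("Music & Audio", ["music", "song", "album", "sound", "audio", "track", "cd", "listen"]),
  ("Books & Reading", ["book", "read", "reading", "story", "character", "author", "novel", "page"]),
  ("Movies & Entertainment", ["movie", "film", "watch", "funny", "cinema", "actor", "director", "scene"]),
  ("Gaming", ["game", "play", "player", "graphic", "level", "gaming", "console", "controller"]),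
  ("Shopping Experience", ["amazon", "product", "received", "ordered", "delivery", "purchase", "buy", "seller"]),
  ("Media & Video", ["dvd", "video", "version", "original", "disc", "format", "quality", "picture"]),
  ("Religious & Spiritual", ["god", "christian", "john", "hero", "powerful", "faith", "church", "bible"]),
  ("Personal Stories", ["love", "life", "world", "child", "family", "personal", "experience", "heart"]),
  ("User Experience", ["great", "very", "work", "use", "bought", "good", "excellent", "recommend"]),
  ("General Reviews", ["not", "but", "rating", "one", "like", "review", "opinion", "think"])
]

-- Exact port of str.title() for ASCII: uppercase a letter after a non-letter, lowercase otherwise.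
def pvTitleChars : Bool → List Char → List Char
  | _, [] => []
  | prevAlpha, c :: cs =>
    if PySem.Chars.isalpha c then
      (if prevAlpha then PySem.Chars.lowerChar c else PySem.Chars.upperChar c) :: pvTitleChars true cs
    else c :: pvTitleChars false cs

def pvTitle (s : String) : String := String.ofList (pvTitleChars false s.toList)

def generate_topic_name (words : List String) : String :=
  let words_lower := words.map PySem.Str.lower
  let topic_scores : PySem.Dict String Int :=
    pvPattern.foldl (fun d p =>
      let score : Int := words_lower.foldl (fun s w => if p.2.contains w then s + 1 else s) 0
      if score > 0 then d.insert p.1 score else d) PySem.Dict.empty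
  match topic_scores.items with
  | q :: rest => (rest.foldl (fun b q' => if q'.2 > b.2 then q' else b) q).1
  | [] =>
    let meaningful_words := (words.filter (fun w => PySem.Str.len w > 3)).take 3
    if meaningful_words.isEmpty then
      "Topic: " ++ pvTitle (PySem.Str.join ", " (words.take 2))
    else
      "Topic: " ++ pvTitle (PySem.Str.join ", " meaningful_words)

-- ===== PORT B =====
-- B's own data: the topic names, and a flat keyword -> topic-index dict literal.
def pvTopics : List String := ["Music & Audio", "Books & Reading", "Movies & Entertainment", "Gaming", "Shopping Experience", "Media & Video", "Religious & Spiritual", "Personal Stories", "User Experience", "General Reviews"]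

def pvKwIdx : PySem.Dict String Int := PySem.Dict.mk [("music", 0), ("song", 0), ("album", 0), ("sound", 0), ("audio", 0), ("track", 0), ("cd", 0), ("listen", 0), ("book", 1), ("read", 1), ("reading", 1), ("story", 1), ("character", 1), ("author", 1), ("novel", 1), ("page", 1), ("movie", 2), ("film", 2), ("watch", 2), ("funny", 2), ("cinema", 2), ("actor", 2), ("director", 2), ("scene", 2), ("game", 3), ("play", 3), ("player", 3), ("graphic", 3), ("level", 3), ("gaming", 3), ("console", 3), ("controller", 3), ("amazon", 4), ("product", 4), ("received", 4), ("ordered", 4), ("delivery", 4), ("purchase", 4), ("buy", 4), ("seller", 4), ("dvd", 5), ("video", 5), ("version", 5), ("original", 5), ("disc", 5), ("format", 5), ("quality", 5), ("picture", 5), ("god", 6), ("christian", 6), ("john", 6), ("hero", 6), ("powerful", 6), ("faith", 6), ("church", 6), ("bible", 6), ("love", 7), ("life", 7), ("world", 7), ("child", 7), ("family", 7), ("personal", 7), ("experience", 7), ("heart", 7), ("great", 8), ("very", 8), ("work", 8), ("use", 8), ("bought", 8), ("good", 8), ("excellent", 8), ("recommend", 8), ("not", 9), ("but", 9), ("rating",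 9), ("one", 9), ("like", 9), ("review", 9), ("opinion", 9), ("think", 9)]

-- the counting for-loop of B, as structural recursion over the words
def pvCountLoop : List String → List Int → List Int
  | [], cs => cs
  | w :: ws, cs =>
    pvCountLoop ws (match pvKwIdx.get? (PySem.Str.lower w) with
      | some i => cs.set i.toNat (cs.getD i.toNat 0 + 1)
      | none => cs)

-- the `for i in range(1, 10)` first-argmax loop of B
def pvBestLoop (cs : List Int) : Int → List Int → Int
  | b, [] => b
  | b, i :: is => pvBestLoop cs (if cs.getD i.toNat 0 > cs.getD b.toNat 0 then i else b) is

-- B's port of str.title(): a single left fold carrying (reversed output, previous-was-letter)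
def pvTitleB (s : String) : String :=
  String.ofList ((s.toList.foldl (fun st c =>
    ((if PySem.Chars.isalpha c then (if st.2 then PySem.Chars.lowerChar c else PySem.Chars.upperChar c) else c) :: st.1,
     PySem.Chars.isalpha c)) (([] : List Char), false)).1.reverse)

def generate_topic_name_alt (words : List String) : String :=
  let counts := pvCountLoop words (List.replicate 10 0)
  if counts.any (fun c => c != 0) then
    PySem.List.pyGetD pvTopics (pvBestLoop counts 0 (PySem.List.pyRange 1 10 1)) ""
  else
    let meaningful := (words.filter (fun w => PySem.Str.len w > 3)).take 3
    let chosen := match meaningful with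
      | [] => words.take 2
      | _ => meaningful
    "Topic: " ++ pvTitleB (PySem.Str.join ", " chosen)

-- ===== PRECONDITION & SPEC =====
def Spec_generate_topic_name (words : List String) (out : String) : Prop := out = generate_topic_name_alt words
instance (words : List String) (out : String) : Decidable (Spec_generate_topic_name words out) := by unfold Spec_generate_topic_name; infer_instance

-- ===== CLAIM (what is proved, stated in full; the proofs are below) =====
def Claim_equal_generate_topic_name : Prop := ∀ (words : List String), Dom_generate_topic_name words → Spec_generate_topic_name words (generate_topic_name words)

-- ===== LEMMAS AND PROOFS =====

def pvAllKW : List String := ["music", "song", "album", "sound", "audio", "track", "cd", "listen", "book", "read", "reading", "story", "character", "author", "novel", "page", "movie", "film", "watch", "funny", "cinema", "actor", "director", "scene", "game", "play", "player", "graphic", "level", "gaming", "console", "controller", "amazon", "product", "received", "ordered", "delivery", "purchase", "buy", "seller", "dvd", "video", "version", "original", "disc", "format", "quality", "picture", "god", "christian", "john", "hero", "powerful", "faith", "church", "bible", "love", "life", "world", "child", "family", "personal", "experience", "heart", "great", "very", "work", "use", "bought", "good", "excellent", "recommend", "not", "but", "rating", "one", "like", "review", "opinion", "think"]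

def pvTen : List Int := [0, 1, 2, 3, 4, 5, 6, 7, 8, 9]

def pvP0 : String × List String := ("", [])

-- per-topic score of A, and per-index score of B
def pvCnt (words : List String) (p : String × List String) : Int :=
  (words.countP (fun w => p.2.contains (PySem.Str.lower w)) : Int)

def pvCntB (words : List String) (j : Int) : Int :=
  (words.countP (fun w => pvKwIdx.get? (PySem.Str.lower w) == some j) : Int)

lemma pvAllmem : ∀ p ∈ pvPattern, ∀ x ∈ p.2, x ∈ pvAllKW := by decide

lemma pvKeys : pvKwIdx.keys = pvAllKW := by decide

lemma pvGetNone (w : String) (hw : w ∉ pvAllKW) : pvKwIdx.get? w = none := by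
  rw [PySem.Dict.get?_eq_none_iff_not_mem_keys, pvKeys]; exact hw

set_option maxRecDepth 20000 in
lemma pvRangeMem : ∀ w ∈ pvAllKW,
    (match pvKwIdx.get? w with | some i => decide (0 ≤ i ∧ i < 10) | none => true) = true := by decide

lemma pvRange (w : String) (i : Int) (h : pvKwIdx.get? w = some i) : 0 ≤ i ∧ i < 10 := by
  by_cases hw : w ∈ pvAllKW
  · have := pvRangeMem w hw
    rw [h] at this
    simpa using this
  · rw [pvGetNone w hw] at h; cases h

lemma pvPatMem : ∀ j ∈ pvTen, pvPattern.getD j.toNat pvP0 ∈ pvPattern := by decide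

lemma pvPatSurj : ∀ p ∈ pvPattern, ∃ j ∈ pvTen, pvPattern.getD j.toNat pvP0 = p := by decide

lemma pvIdxPat : ∀ j ∈ pvTen, pvTopics.idxOf (pvPattern.getD j.toNat pvP0).1 = j.toNat := by decide

lemma pvIdxTopics : ∀ i ∈ pvTen, pvTopics.idxOf (PySem.List.pyGetD pvTopics i "") = i.toNat := by decide

set_option maxRecDepth 40000 in
lemma pvHitMem : ∀ w ∈ pvAllKW, ∀ j ∈ pvTen,
    (pvKwIdx.get? w == some j) = (pvPattern.getD j.toNat pvP0).2.contains w := by decide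

lemma pvHit (j : Int) (hj : j ∈ pvTen) (w : String) :
    (pvKwIdx.get? w == some j) = (pvPattern.getD j.toNat pvP0).2.contains w := by
  by_cases hw : w ∈ pvAllKW
  · exact pvHitMem w hw j hj
  · rw [pvGetNone w hw]
    have hx : w ∉ (pvPattern.getD j.toNat pvP0).2 :=
      fun h => hw (pvAllmem _ (pvPatMem j hj) w h)
    simp only [List.getD] at hx ⊢
    simp [hx]

lemma pvCntB_eq (words : List String) (j : Int) (hj : j ∈ pvTen) :
    pvCntB words j = pvCnt words (pvPattern.getD j.toNat pvP0) := by
  unfold pvCntB pvCnt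
  have hfun : (fun w => pvKwIdx.get? (PySem.Str.lower w) == some j)
      = (fun w => (pvPattern.getD j.toNat pvP0).2.contains (PySem.Str.lower w)) :=
    funext (fun w => pvHit j hj (PySem.Str.lower w))
  rw [hfun]

-- the counting loop preserves the length
lemma pvCountLoop_length (ws : List String) (cs : List Int) :
    (pvCountLoop ws cs).length = cs.length := by
  induction ws generalizing cs with
  | nil => rfl
  | cons w ws ih =>
    rw [pvCountLoop]
    cases pvKwIdx.get? (PySem.Str.lower w) <;> simp [ih]

-- value of each slot after the counting loop
lemma pvCountLoop_getD (ws : List String) (cs : List Int) (j : Int)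
    (hj : 0 ≤ j ∧ j < 10) (hlen : cs.length = 10) :
    (pvCountLoop ws cs).getD j.toNat 0 = cs.getD j.toNat 0 + pvCntB ws j := by
  induction ws generalizing cs with
  | nil => simp [pvCountLoop, pvCntB]
  | cons w ws ih =>
    rw [pvCountLoop]
    have hcnt : pvCntB (w :: ws) j
        = (if pvKwIdx.get? (PySem.Str.lower w) == some j then 1 else 0) + pvCntB ws j := by
      unfold pvCntB
      rw [List.countP_cons]
      split <;> push_cast <;> ring
    cases hq : pvKwIdx.get? (PySem.Str.lower w) with
    | none =>
      rw [ih cs hlen, hcnt, hq]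
      simp
    | some i =>
      have hi := pvRange _ _ hq
      have hne : (cs.set i.toNat (cs.getD i.toNat 0 + 1)).length = 10 := by
        simpa using hlen
      rw [ih _ hne, hcnt, hq]
      by_cases hij : i = j
      · subst hij
        have hlt : i.toNat < cs.length := by omega
        simp only [List.getD, List.getElem?_set_self hlt]
        simp
        ring
      · have hnat : i.toNat ≠ j.toNat := by omega
        simp only [List.getD, List.getElem?_set_ne hnat]
        have : (some i == some j) = false := by simpa using hij
        rw [this]
        simp

lemma pvCounts_getD (words : List String) (j : Int) (hj : j ∈ pvTen) :
    (pvCountLoop words (List.replicate 10 0)).getD j.toNat 0 = pvCntB words j := by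
  have hj' : 0 ≤ j ∧ j < 10 := by fin_cases hj <;> omega
  rw [pvCountLoop_getD words _ j hj' (by simp)]
  have h0 : (List.replicate 10 (0 : Int)).getD j.toNat 0 = 0 := by
    rw [List.getD]
    cases hx : (List.replicate 10 (0 : Int))[j.toNat]? with
    | none => rfl
    | some x =>
      have := List.mem_replicate.mp (List.mem_of_getElem? hx)
      simp [this.2]
  rw [h0]
  ring

-- `any(counts)` is false exactly when every per-index score is zero
lemma pvAnyFalse (words : List String) :
    ((pvCountLoop words (List.replicate 10 0)).any (fun c => c != 0) = false)
      ↔ ∀ j ∈ pvTen, pvCntB words j = 0 := by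
  have hlen : (pvCountLoop words (List.replicate 10 0)).length = 10 := by
    simp [pvCountLoop_length]
  constructor
  · intro h j hj
    rw [← pvCounts_getD words j hj]
    have hj' : j.toNat < (pvCountLoop words (List.replicate 10 0)).length := by
      rw [hlen]; fin_cases hj <;> omega
    have hmem : (pvCountLoop words (List.replicate 10 0)).getD j.toNat 0
        ∈ pvCountLoop words (List.replicate 10 0) := by
      rw [List.getD_eq_getElem _ _ hj']
      exact List.getElem_mem hj'
    simp only [List.any_eq_false] at h
    have := h _ hmem
    simpa using this
  · intro h
    simp only [List.any_eq_false]
    intro x hx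
    obtain ⟨n, hn, hxn⟩ := List.mem_iff_getElem.mp hx
    have hn10 : n < 10 := hlen ▸ hn
    have hmem : (n : Int) ∈ pvTen := by
      simp only [pvTen, List.mem_cons]
      omega
    have := pvCounts_getD words (n : Int) hmem
    rw [Int.toNat_natCast, List.getD_eq_getElem _ _ hn, hxn] at this
    simp [this, h _ hmem]

-- A's score dict is the positive-score patterns with their counts
lemma pvItemsA (words : List String) :
    (pvPattern.foldl (fun d p =>
      let score : Int := (words.map PySem.Str.lower).foldl (fun s w => if p.2.contains w then s + 1 else s) 0
      if score > 0 then d.insert p.1 score else d) PySem.Dict.empty).items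
    = (pvPattern.filter (fun p => decide (0 < pvCnt words p))).map (fun p => (p.1, pvCnt words p)) := by
  have hstep : ∀ (d : PySem.Dict String Int) (p : String × List String),
      (let score : Int := (words.map PySem.Str.lower).foldl (fun s w => if p.2.contains w then s + 1 else s) 0
       if score > 0 then d.insert p.1 score else d)
      = if 0 < pvCnt words p then d.insert p.1 (pvCnt words p) else d := by
    intro d p
    have h1 : (words.map PySem.Str.lower).foldl (fun s w => if p.2.contains w then s + 1 else s) (0:Int)
        = pvCnt words p := by
      rw [PySem.List.foldl_if_add_one]
      simp only [zero_add, pvCnt, List.countP_map]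
      rfl
    simp only [h1]
  rw [PySem.List.foldl_congr_mem pvPattern _
        (fun d p => if 0 < pvCnt words p then d.insert p.1 (pvCnt words p) else d)
        PySem.Dict.empty (fun acc x _ => hstep acc x)]
  rw [PySem.List.foldl_ite_eq_foldl_filter]
  rw [PySem.Dict.items_foldl_insert_fresh _ Prod.fst (fun p => pvCnt words p) _
        (fun a _ => by simp [PySem.Dict.contains, PySem.Dict.empty])
        (List.Nodup.sublist (List.Sublist.map Prod.fst List.filter_sublist) (by decide))]
  simp [PySem.Dict.empty]

-- A has no positive score exactly when every per-index score of B is zero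
lemma pvFilterNil (words : List String) :
    (pvPattern.filter (fun p => decide (0 < pvCnt words p)) = [])
      ↔ ∀ j ∈ pvTen, pvCntB words j = 0 := by
  rw [List.filter_eq_nil_iff]
  constructor
  · intro h j hj
    rw [pvCntB_eq words j hj]
    have := h _ (pvPatMem j hj)
    have hge : 0 ≤ pvCnt words (pvPattern.getD j.toNat pvP0) := Int.natCast_nonneg _
    simp only [decide_eq_true_eq, not_lt] at this
    omega
  · intro h p hp
    obtain ⟨j, hj, hpj⟩ := pvPatSurj p hp
    have := h j hj
    rw [pvCntB_eq words j hj, hpj] at this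
    simp [this]

-- first-argmax loop over topic names
def pvRun (v : String → Int) (b : String) (l : List String) : String :=
  l.foldl (fun b t => if v t > v b then t else b) b

lemma pvPairRun (v : String → Int) (l : List String) (t0 : String) :
    ((l.map (fun t => (t, v t))).foldl (fun b q => if q.2 > b.2 then q else b) (t0, v t0)).1
      = pvRun v t0 l := by
  rw [List.foldl_map, pvRun]
  induction l generalizing t0 with
  | nil => rfl
  | cons t l ih =>
    simp only [List.foldl_cons]
    have : (if (t, v t).2 > (t0, v t0).2 then (t, v t) else (t0, v t0))
        = ((if v t > v t0 then t else t0), v (if v t > v t0 then t else t0)) := by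
      split <;> simp_all
    rw [this, ih]

lemma pvRunFilterPos (v : String → Int) (l : List String) (b : String) (hb : 0 < v b) :
    pvRun v b (l.filter (fun t => decide (0 < v t))) = pvRun v b l := by
  induction l generalizing b with
  | nil => rfl
  | cons t l ih =>
    by_cases ht : 0 < v t
    · simp only [List.filter_cons, ht, decide_true, if_true, pvRun, List.foldl_cons]
      by_cases hc : v t > v b <;> simp only [hc, if_true, if_false] <;>
        first
          | exact ih _ ht
          | exact ih _ hb
    · have hnb : ¬ v t > v b := by omega
      simp only [List.filter_cons, ht, decide_false, if_false, pvRun, List.foldl_cons, hnb]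
      exact ih _ hb

lemma pvRunSkip (v : String → Int) (l : List String) (b h : String) (hs : List String)
    (hb : v b ≤ 0) (hf : l.filter (fun t => decide (0 < v t)) = h :: hs) :
    pvRun v b l = pvRun v h hs := by
  induction l generalizing b with
  | nil => simp at hf
  | cons t l ih =>
    by_cases ht : 0 < v t
    · have hgt : v t > v b := by omega
      simp only [List.filter_cons, ht, decide_true, if_true] at hf
      have ht2 : t = h := by injection hf
      have hs2 : l.filter (fun t => decide (0 < v t)) = hs := by injection hf
      subst ht2
      simp only [pvRun, List.foldl_cons, hgt, if_true]
      rw [← hs2]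
      exact (pvRunFilterPos v l t ht).symm
    · simp only [List.filter_cons, ht, decide_false] at hf
      have hle : v t ≤ 0 := by omega
      by_cases hc : v t > v b
      · have h2 := ih t hle hf
        simp only [pvRun, List.foldl_cons, if_pos hc]
        simpa [pvRun] using h2
      · have h2 := ih b hb hf
        simp only [pvRun, List.foldl_cons, if_neg hc]
        simpa [pvRun] using h2

def pvTail9 : List String := ["Books & Reading", "Movies & Entertainment", "Gaming", "Shopping Experience", "Media & Video", "Religious & Spiritual", "Personal Stories", "User Experience", "General Reviews"]

lemma pvSelEq (v : String → Int) (q : String × List String) (qs : List (String × List String))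
    (hfl : pvPattern.filter (fun p => decide (0 < v p.1)) = q :: qs) :
    pvRun v q.1 (qs.map Prod.fst) = pvRun v "Music & Audio" pvTail9 := by
  have hfilter : (pvPattern.map Prod.fst).filter (fun t => decide (0 < v t)) = q.1 :: qs.map Prod.fst := by
    rw [List.filter_map]
    have hcomp : ((fun t => decide (0 < v t)) ∘ Prod.fst) = (fun p : String × List String => decide (0 < v p.1)) := rfl
    rw [hcomp, hfl]
    simp
  have hts : pvPattern.map Prod.fst = "Music & Audio" :: pvTail9 := rfl
  rw [hts, List.filter_cons] at hfilter
  by_cases h1 : 0 < v "Music & Audio"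
  · simp only [h1, decide_true, if_true] at hfilter
    have h2 : "Music & Audio" = q.1 := by injection hfilter
    have h3 : pvTail9.filter (fun t => decide (0 < v t)) = qs.map Prod.fst := by injection hfilter
    rw [← h2, ← h3]
    exact pvRunFilterPos v pvTail9 "Music & Audio" h1
  · simp only [h1, decide_false] at hfilter
    exact (pvRunSkip v pvTail9 "Music & Audio" q.1 (qs.map Prod.fst) (by omega) hfilter).symm

-- B's index argmax loop is the name argmax loop through g
lemma pvBestLoop_map (c : List Int) (v : String → Int) (g : Int → String)
    (l : List Int) (b : Int) (h : ∀ i ∈ b :: l, v (g i) = c.getD i.toNat 0) :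
    pvRun v (g b) (l.map g) = g (pvBestLoop c b l) := by
  induction l generalizing b with
  | nil => rfl
  | cons i is ih =>
    simp only [List.map_cons, pvRun, List.foldl_cons, pvBestLoop]
    have hb := h b (by simp)
    have hi := h i (by simp)
    rw [hb, hi]
    have hstep : (if c.getD i.toNat 0 > c.getD b.toNat 0 then g i else g b)
        = g (if c.getD i.toNat 0 > c.getD b.toNat 0 then i else b) := by
      split <;> rfl
    rw [hstep]
    exact ih _ (fun x hx => by
      rcases List.mem_cons.mp hx with rfl | hx
      · split <;> [exact hi; exact hb]
      · exact h x (by simp [hx]))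

-- B's title fold equals A's title recursion
lemma pvTitleFold (l : List Char) (acc : List Char) (b : Bool) :
    ((l.foldl (fun st c =>
      ((if PySem.Chars.isalpha c then (if st.2 then PySem.Chars.lowerChar c else PySem.Chars.upperChar c) else c) :: st.1,
       PySem.Chars.isalpha c)) (acc, b)).1).reverse = acc.reverse ++ pvTitleChars b l := by
  induction l generalizing acc b with
  | nil => simp [pvTitleChars]
  | cons c cs ih =>
    simp only [List.foldl_cons]
    rw [ih]
    by_cases hc : PySem.Chars.isalpha c = true <;> simp [pvTitleChars, hc]

lemma pvTitleB_eq (s : String) : pvTitleB s = pvTitle s := by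
  unfold pvTitleB pvTitle
  rw [pvTitleFold]
  simp

-- ===== VERDICT (by name: the statement is the Claim_ definition above) =====
set_option maxRecDepth 40000 in
theorem generate_topic_name_spec : Claim_equal_generate_topic_name := by
  intro words _
  unfold Spec_generate_topic_name
  simp only [generate_topic_name, generate_topic_name_alt]
  rw [pvItemsA]
  cases hfl : pvPattern.filter (fun p => decide (0 < pvCnt words p)) with
  | nil =>
    have hz := (pvFilterNil words).mp hfl
    have hany := (pvAnyFalse words).mpr hz
    rw [hany]
    simp only [List.map_nil, Bool.false_eq_true, if_false]
    rw [pvTitleB_eq]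
    cases hm : (words.filter (fun w => PySem.Str.len w > 3)).take 3 with
    | nil => simp
    | cons a as => simp
  | cons q qs =>
    -- B's value function on topic names
    set c := pvCountLoop words (List.replicate 10 0) with hc
    set v : String → Int := fun t => c.getD (pvTopics.idxOf t) 0 with hv
    have hveq : ∀ p ∈ pvPattern, v p.1 = pvCnt words p := by
      intro p hp
      obtain ⟨j, hj, hpj⟩ := pvPatSurj p hp
      have hidx : pvTopics.idxOf p.1 = j.toNat := by rw [← hpj]; exact pvIdxPat j hj
      rw [hv]
      simp only
      rw [hidx, hc, pvCounts_getD words j hj, pvCntB_eq words j hj, hpj]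
    -- A's branch
    have hqf : q ∈ pvPattern.filter (fun p => decide (0 < pvCnt words p)) := by
      rw [hfl]; exact List.mem_cons_self
    have hqp : q ∈ pvPattern := List.mem_of_mem_filter hqf
    have hq0 : 0 < pvCnt words q := by
      have := (List.mem_filter.mp hqf).2
      simpa using this
    -- B takes the argmax branch
    have hanyT : c.any (fun x => x != 0) = true := by
      by_contra h
      have hz := (pvAnyFalse words).mp (by
        rw [← hc] at *
        exact Bool.eq_false_iff.mpr h)
      have := (pvFilterNil words).mpr hz
      rw [hfl] at this
      simp at this
    rw [hanyT]
    simp only [if_true, List.map_cons]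
    -- rewrite A's pairs through v
    have hmapq : (q.1, pvCnt words q) = (q.1, v q.1) := by rw [hveq q hqp]
    have hmap : qs.map (fun p => (p.1, pvCnt words p))
        = (qs.map Prod.fst).map (fun t => (t, v t)) := by
      rw [List.map_map]
      apply List.map_congr_left
      intro p hp
      have hpp : p ∈ pvPattern := List.mem_of_mem_filter (by rw [hfl]; exact List.mem_cons_of_mem _ hp)
      exact congrArg (Prod.mk p.1) (hveq p hpp).symm
    rw [hmapq, hmap, pvPairRun]
    have hfl2 : pvPattern.filter (fun p => decide (0 < v p.1)) = q :: qs := by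
      rw [← hfl]
      apply List.filter_congr
      intro p hp
      rw [hveq p hp]
    rw [pvSelEq v q qs hfl2]
    -- B's side through pvBestLoop_map
    have hR : PySem.List.pyRange 1 10 1 = [1, 2, 3, 4, 5, 6, 7, 8, 9] := by decide
    have hmapT : ([1, 2, 3, 4, 5, 6, 7, 8, 9] : List Int).map (fun i => PySem.List.pyGetD pvTopics i "") = pvTail9 := by decide
    have hg0 : PySem.List.pyGetD pvTopics (0 : Int) "" = "Music & Audio" := by decide
    have hB := pvBestLoop_map c v (fun i => PySem.List.pyGetD pvTopics i "")
      [1, 2, 3, 4, 5, 6, 7, 8, 9] 0 (by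
        intro i hi
        have hiT : i ∈ pvTen := by
          simpa [pvTen] using hi
        have hidx := pvIdxTopics i hiT
        rw [hv]
        simp only
        rw [hidx])
    rw [hR, ← hmapT, ← hg0]
    exact hB
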